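-- pv_equiv track=rewrite | github.com/sbremer/adventofcode2016 | day7.py | check_address_abba
-- ===== SOURCE A (Python) =====
-- def check_abba(part):
--
--     # Assuming even number of chars
--
--     # Check abba at even positions
--     prev_char1, prev_char2 = '_', '_'
--     for char1, char2 in zip(part[::2], part[1::2]):
--
--         if char1 == prev_char2 and char2 == prev_char1 and char1 != char2:
--             return True
--
--         prev_char1, prev_char2 = char1, char2
--
--     # Check shifted at odd positions
--     prev_char1, prev_char2 = '_', '_'
--     for char1, char2 in zip(part[1::2], part[2::2]):
--
--         if char1 == prev_char2 and char2 == prev_char1 and char1 != char2: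
--             return True
--
--         prev_char1, prev_char2 = char1, char2
--
--     return False
--
-- def check_address_abba(address):
--     abba_out_brackets = False
--     parts = address.split(']')
--
--     for part in parts:
--         sub = part.split('[')
--
--         if len(sub) == 2 and check_abba(sub[1]):
--             return False
--
--         if check_abba(sub[0]):
--             abba_out_brackets = True
--
--     if abba_out_brackets:
--         return True
--     else:
--         return False
-- ===== SOURCE B (Python) =====
-- def check_address_abba(address):
--     def has_abba(p):
--         i = 0
--         while i + 3 < len(p):
--             if p[i] == p[i + 3] and p[i + 1] == p[i + 2] and p[i] != p[i + 1]:
--                 return True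
--             i += 1
--         return False
--
--     subs = [part.split('[') for part in address.split(']')]
--     if any(len(s) == 2 and has_abba(s[1]) for s in subs):
--         return False
--     return any(has_abba(s[0]) for s in subs)
-- ===== Notes on version B (the rewrite author's own statement) =====
-- stated objective: simpler
-- what changed: check_abba's two interleaved even/odd pair-comparison passes with sentinel state are replaced by one direct sliding length-4 window scan, and the outer early-return loop with a flag is replaced by splitting every part once and running two any-passes (bracketed sections first, then supernet sections).
import Mathlib
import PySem

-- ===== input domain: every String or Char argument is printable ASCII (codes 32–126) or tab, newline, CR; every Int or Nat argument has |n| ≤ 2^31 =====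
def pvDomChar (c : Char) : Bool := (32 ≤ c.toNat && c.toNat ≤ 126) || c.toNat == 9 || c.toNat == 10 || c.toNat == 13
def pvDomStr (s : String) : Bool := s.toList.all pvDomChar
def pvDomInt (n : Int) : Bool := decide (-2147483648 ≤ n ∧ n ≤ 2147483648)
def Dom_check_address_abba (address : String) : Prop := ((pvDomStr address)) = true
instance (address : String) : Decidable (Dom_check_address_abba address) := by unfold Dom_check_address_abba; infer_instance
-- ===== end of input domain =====

-- B replaces A's two interleaved even/odd pair-scan passes in check_abba by one sliding
-- length-4 window scan, and A's early-return loop with a flag by two any-passes (objective: simpler).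

-- ===== PORT A =====

-- the body of each of A's two zip-loops, carrying (prev_char1, prev_char2)
def pvPassLoop : List (Char × Char) → Char → Char → Bool
  | [], _, _ => false
  | (c1, c2) :: rest, p1, p2 =>
    if c1 = p2 ∧ c2 = p1 ∧ c1 ≠ c2 then true
    else pvPassLoop rest c1 c2

def check_abba (part : List Char) : Bool :=
  -- zip(part[::2], part[1::2]) then zip(part[1::2], part[2::2]); slices via PySem.List.slice?
  (pvPassLoop (((PySem.List.slice? part none none 2).getD []).zip
               ((PySem.List.slice? part (some 1) none 2).getD [])) '_' '_')
  || (pvPassLoop (((PySem.List.slice? part (some 1) none 2).getD []).zip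
               ((PySem.List.slice? part (some 2) none 2).getD [])) '_' '_')

-- A's for-loop over parts, carrying abba_out_brackets and returning early on a bracketed abba
def pvLoopA : List (List Char) → Bool → Bool
  | [], flag => if flag then true else false
  | part :: rest, flag =>
    let sub := PySem.Chars.splitOn part ['[']
    if sub.length = 2 ∧ check_abba ((PySem.List.pyGet? sub 1).getD []) then false
    else pvLoopA rest (if check_abba ((PySem.List.pyGet? sub 0).getD []) then true else flag)

def check_address_abba (address : String) : Bool :=
  pvLoopA (PySem.Chars.splitOn address.toList [']']) false

-- ===== PORT B =====

-- B's while loop: one sliding length-4 window at index i (reads are in range, ported as getD)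
def pvHasAbbaLoop (p : List Char) (i : Nat) : Bool :=
  if i + 3 < p.length then
    if p.getD i '_' = p.getD (i + 3) '_' ∧ p.getD (i + 1) '_' = p.getD (i + 2) '_'
        ∧ p.getD i '_' ≠ p.getD (i + 1) '_' then true
    else pvHasAbbaLoop p (i + 1)
  else false
termination_by p.length - i

def pvHasAbba (p : List Char) : Bool := pvHasAbbaLoop p 0

def check_address_abba_alt (address : String) : Bool :=
  let subs := (PySem.Chars.splitOn address.toList [']']).map (fun part => PySem.Chars.splitOn part ['['])
  if subs.any (fun s => s.length = 2 && pvHasAbba ((PySem.List.pyGet? s 1).getD [])) then false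
  else subs.any (fun s => pvHasAbba ((PySem.List.pyGet? s 0).getD []))

-- ===== PRECONDITION & SPEC =====
def Spec_check_address_abba (address : String) (out : Bool) : Prop := out = check_address_abba_alt address
instance (address : String) (out : Bool) : Decidable (Spec_check_address_abba address out) := by unfold Spec_check_address_abba; infer_instance

-- ===== CLAIM (what is proved, stated in full; the proofs are below) =====
def Claim_equal_check_address_abba : Prop := ∀ (address : String), Dom_check_address_abba address → Spec_check_address_abba address (check_address_abba address)

-- ===== LEMMAS AND PROOFS =====

-- elements of xs at even positions: xs[::2]
def pvEvens {α : Type} : List α → List α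
  | [] => []
  | [a] => [a]
  | a :: _ :: t => a :: pvEvens t

theorem pvEvens_cons {α : Type} (a : α) (t : List α) :
    pvEvens (a :: t) = a :: pvEvens t.tail := by cases t <;> rfl

theorem pv_stride2_core {α : Type} (xs : List α) (s : Nat) :
    List.filterMap (fun k => xs[s + 2 * k]?) (List.range ((xs.length - s + 1) / 2))
      = pvEvens (xs.drop s) := by
  induction xs generalizing s with
  | nil =>
    simp [pvEvens]
  | cons a t ih =>
    cases s with
    | zero =>
      have hc : ((a :: t).length - 0 + 1) / 2 = t.length / 2 + 1 := by
        simp; omega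
      rw [hc, List.range_succ_eq_map, List.filterMap_cons]
      simp only [Nat.zero_add, Nat.mul_zero, List.getElem?_cons_zero]
      rw [List.filterMap_map, List.drop_zero, pvEvens_cons]
      congr 1
      have harg : ((fun k => (a :: t)[2 * k]?) ∘ Nat.succ) = (fun k => t[1 + 2 * k]?) := by
        funext k
        have h2 : 2 * (Nat.succ k) = (1 + 2 * k) + 1 := by omega
        simp only [Function.comp, h2, List.getElem?_cons_succ]
      have hcnt : t.length / 2 = (t.length - 1 + 1) / 2 := by omega
      rw [harg, hcnt, ih 1]
      cases t <;> simp
    | succ s' =>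
      have hc : ((a :: t).length - (s' + 1) + 1) / 2 = (t.length - s' + 1) / 2 := by
        simp
      have harg : (fun k => (a :: t)[(s' + 1) + 2 * k]?) = (fun k => t[s' + 2 * k]?) := by
        funext k
        have h2 : (s' + 1) + 2 * k = (s' + 2 * k) + 1 := by omega
        rw [h2, List.getElem?_cons_succ]
      rw [hc, harg, List.drop_succ_cons, ih s']

theorem pv_slice2 {α : Type} (xs : List α) (s : Nat) :
    (PySem.List.slice? xs (some (s : Int)) none 2).getD [] = pvEvens (xs.drop s) := by
  have h2 : ¬ ((2:Int) = 0) := by norm_num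
  have hneg : ¬ ((2:Int) < 0) := by norm_num
  have hs0 : ¬ ((s:Int) < 0) := by omega
  simp only [PySem.List.slice?, PySem.List.sliceIndices, if_neg h2, if_neg hneg, if_neg hs0,
    if_pos (by norm_num : (0:Int) < 2), Option.getD_some]
  by_cases hs : s < xs.length
  · have hmin : min (s:Int) (xs.length:Int) = (s:Int) := by omega
    rw [hmin, if_pos (by omega : (s:Int) < (xs.length:Int))]
    have hcnt : (((xs.length:Int) - (s:Int) + 2 - 1) / 2).toNat = (xs.length - s + 1) / 2 := by
      have h : ((xs.length:Int) - (s:Int) + 2 - 1) = ((xs.length - s + 1 : Nat) : Int) := by omega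
      rw [h]
      omega
    rw [hcnt]
    have harg : (fun k : Nat => xs[((s:Int) + 2 * (k:Int)).toNat]?) = (fun k : Nat => xs[s + 2 * k]?) := by
      funext k
      congr 1
    rw [harg]
    exact pv_stride2_core xs s
  · have hmin : min (s:Int) (xs.length:Int) = (xs.length:Int) := by omega
    rw [hmin, if_neg (by omega : ¬ ((xs.length:Int) < (xs.length:Int)))]
    have hnil : xs.drop s = [] := by
      apply List.drop_eq_nil_of_le; omega
    simp [hnil, pvEvens]

theorem pv_slice2_none {α : Type} (xs : List α) :
    (PySem.List.slice? xs none none 2).getD [] = pvEvens xs := by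
  have h : PySem.List.slice? xs none none 2 = PySem.List.slice? xs (some (0:Int)) none 2 := by
    simp [PySem.List.slice?, PySem.List.sliceIndices]
  rw [h]
  simpa using pv_slice2 xs 0

-- consecutive disjoint pairs of xs, = zip(xs[::2], xs[1::2])
def pvPairs {α : Type} : List α → List (α × α)
  | a :: b :: t => (a, b) :: pvPairs t
  | _ => []

theorem pv_zip_evens {α : Type} : ∀ (xs : List α),
    (pvEvens xs).zip (pvEvens xs.tail) = pvPairs xs
  | [] => rfl
  | [_] => rfl
  | a :: b :: t => by
    rw [pvEvens_cons]
    simp only [List.tail_cons, pvEvens_cons, List.zip_cons_cons]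
    rw [pv_zip_evens t]
    rfl

-- abba windows at even positions of (p1 :: p2 :: p)
def pvWE : List Char → Bool
  | x :: y :: c :: d :: t => (if c = y ∧ d = x ∧ c ≠ d then true else pvWE (c :: d :: t))
  | _ => false

theorem pv_passLoop_eq_wE : ∀ (p : List Char) (p1 p2 : Char),
    pvPassLoop (pvPairs p) p1 p2 = pvWE (p1 :: p2 :: p)
  | [], _, _ => rfl
  | [_], _, _ => rfl
  | a :: b :: t, p1, p2 => by
    show pvPassLoop ((a, b) :: pvPairs t) p1 p2 = _
    rw [pvPassLoop, pvWE]
    split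
    · rfl
    · exact pv_passLoop_eq_wE t a b

theorem pv_wE_sentinel (p : List Char) : pvWE ('_' :: '_' :: p) = pvWE p := by
  match p with
  | [] => rfl
  | [_] => rfl
  | c :: d :: t =>
    show pvWE ('_' :: '_' :: c :: d :: t) = _
    rw [pvWE, if_neg]
    rintro ⟨h1, h2, h3⟩
    exact h3 (h1.trans h2.symm)

-- abba window at every position: the predicate B's sliding window computes
def pvW : List Char → Bool
  | a :: b :: c :: d :: t => (if a = d ∧ b = c ∧ a ≠ b then true else pvW (b :: c :: d :: t))
  | _ => false

theorem pv_cond_iff (a b c d : Char) :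
    (c = b ∧ d = a ∧ c ≠ d) ↔ (a = d ∧ b = c ∧ a ≠ b) := by
  constructor <;> rintro ⟨h1, h2, h3⟩ <;> subst_vars <;>
    exact ⟨rfl, rfl, fun h => h3 h.symm⟩

theorem pv_wE_or_tail : ∀ (p : List Char), (pvWE p || pvWE p.tail) = pvW p
  | [] => rfl
  | [_] => rfl
  | [_, _] => rfl
  | [_, _, _] => rfl
  | a :: b :: c :: d :: t => by
    show (pvWE (a :: b :: c :: d :: t) || pvWE (b :: c :: d :: t)) = pvW (a :: b :: c :: d :: t)
    rw [pvWE, pvW]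
    have hih : (pvWE (b :: c :: d :: t) || pvWE (c :: d :: t)) = pvW (b :: c :: d :: t) := by
      simpa using pv_wE_or_tail (b :: c :: d :: t)
    rw [← hih]
    by_cases h2 : (a = d ∧ b = c ∧ a ≠ b)
    · rw [if_pos ((pv_cond_iff a b c d).mpr h2), if_pos h2]
      simp
    · rw [if_neg (fun h => h2 ((pv_cond_iff a b c d).mp h)), if_neg h2]
      cases pvWE (c :: d :: t) <;> cases pvWE (b :: c :: d :: t) <;> rfl

theorem pv_w_short (p : List Char) (h : p.length < 4) : pvW p = false := by
  match p, h with
  | [], _ => rfl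
  | [_], _ => rfl
  | [_, _], _ => rfl
  | [_, _, _], _ => rfl

theorem pv_check_abba_eq (p : List Char) : check_abba p = pvW p := by
  rw [check_abba]
  have hdrop : p.drop 2 = p.tail.tail := by
    rw [show (2 = 1 + 1) from rfl, ← List.drop_drop, List.drop_one, List.drop_one]
  have h1 : (PySem.List.slice? p (some (1:Int)) none 2).getD [] = pvEvens p.tail := by
    have h := pv_slice2 p 1
    rw [List.drop_one] at h
    exact_mod_cast h
  have h2 : (PySem.List.slice? p (some (2:Int)) none 2).getD [] = pvEvens p.tail.tail := by
    have h := pv_slice2 p 2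
    rw [hdrop] at h
    exact_mod_cast h
  rw [pv_slice2_none, h1, h2, pv_zip_evens, pv_zip_evens, pv_passLoop_eq_wE,
    pv_passLoop_eq_wE, pv_wE_sentinel, pv_wE_sentinel, pv_wE_or_tail]

theorem pv_hasAbbaLoop_eq (p : List Char) (i : Nat) : pvHasAbbaLoop p i = pvW (p.drop i) := by
  rw [pvHasAbbaLoop]
  by_cases h : i + 3 < p.length
  · rw [if_pos h]
    have h0 : i < p.length := by omega
    have ha : i + 1 < p.length := by omega
    have hb : i + 2 < p.length := by omega
    have hd : p.drop i = p[i] :: p[i+1] :: p[i+2] :: p[i+3] :: p.drop (i + 4) := by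
      rw [List.drop_eq_getElem_cons h0, List.drop_eq_getElem_cons ha,
        List.drop_eq_getElem_cons hb, List.drop_eq_getElem_cons h]
    have hd1 : p.drop (i + 1) = p[i+1] :: p[i+2] :: p[i+3] :: p.drop (i + 4) := by
      rw [List.drop_eq_getElem_cons ha, List.drop_eq_getElem_cons hb,
        List.drop_eq_getElem_cons h]
    rw [hd, pvW, List.getD_eq_getElem _ _ h0, List.getD_eq_getElem _ _ ha,
      List.getD_eq_getElem _ _ hb, List.getD_eq_getElem _ _ h]
    split
    · rfl
    · rw [pv_hasAbbaLoop_eq p (i + 1), hd1]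
  · rw [if_neg h, Eq.comm]
    apply pv_w_short
    simp
    omega
termination_by p.length - i

theorem pv_check_abba_eq_hasAbba (p : List Char) : check_abba p = pvHasAbba p := by
  rw [pv_check_abba_eq, pvHasAbba, pv_hasAbbaLoop_eq, List.drop_zero]

-- A's loop = "no bracketed abba anywhere" gated over "some supernet abba"
theorem pv_loopA_eq (parts : List (List Char)) (flag : Bool) :
    pvLoopA parts flag =
      if parts.any (fun part => (PySem.Chars.splitOn part ['[']).length = 2
            && check_abba ((PySem.List.pyGet? (PySem.Chars.splitOn part ['[']) 1).getD [])) then false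
      else flag || parts.any (fun part => check_abba ((PySem.List.pyGet? (PySem.Chars.splitOn part ['[']) 0).getD [])) := by
  induction parts generalizing flag with
  | nil => cases flag <;> rfl
  | cons part rest ih =>
    rw [pvLoopA]
    simp only [List.any_cons]
    by_cases hbad : (PySem.Chars.splitOn part ['[']).length = 2
        ∧ check_abba ((PySem.List.pyGet? (PySem.Chars.splitOn part ['[']) 1).getD []) = true
    · rw [if_pos hbad]
      have hbt : ((PySem.Chars.splitOn part ['[']).length = 2
          && check_abba ((PySem.List.pyGet? (PySem.Chars.splitOn part ['[']) 1).getD [])) = true := by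
        rw [Bool.and_eq_true]
        exact ⟨decide_eq_true hbad.1, hbad.2⟩
      rw [hbt]
      simp
    · rw [if_neg hbad]
      have hb : ((PySem.Chars.splitOn part ['[']).length = 2
          && check_abba ((PySem.List.pyGet? (PySem.Chars.splitOn part ['[']) 1).getD [])) = false := by
        by_cases hl : (PySem.Chars.splitOn part ['[']).length = 2
        · have hc : check_abba ((PySem.List.pyGet? (PySem.Chars.splitOn part ['[']) 1).getD []) = false := by
            cases hcc : check_abba ((PySem.List.pyGet? (PySem.Chars.splitOn part ['[']) 1).getD [])
            · rfl
            · exact absurd ⟨hl, hcc⟩ hbad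
          simp [hc]
        · simp [hl]
      rw [hb, ih]
      simp only [Bool.false_or]
      by_cases hany : (rest.any (fun part => (PySem.Chars.splitOn part ['[']).length = 2
            && check_abba ((PySem.List.pyGet? (PySem.Chars.splitOn part ['[']) 1).getD []))) = true
      · rw [if_pos hany, if_pos hany]
      · rw [if_neg hany, if_neg hany]
        cases hgood : check_abba ((PySem.List.pyGet? (PySem.Chars.splitOn part ['[']) 0).getD []) <;>
          cases flag <;> simp

-- ===== VERDICT (by name: the statement is the Claim_ definition above) =====
theorem check_address_abba_spec : Claim_equal_check_address_abba := by
  intro address _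
  show check_address_abba address = check_address_abba_alt address
  rw [check_address_abba, check_address_abba_alt, pv_loopA_eq]
  have hfun : check_abba = pvHasAbba := funext pv_check_abba_eq_hasAbba
  simp only [List.any_map, Function.comp_def, hfun, Bool.false_or]
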